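-- pv_equiv track=rewrite | github.com/calyx-servicios/custom-etilfarma | foreign_purchase_order/models/purchase_order.py | _get_currency_payment_list
-- ===== SOURCE A (Python) =====
-- def _get_currency_payment_list(list_currency):
--     """ It returns the elements of the
--         list that are not repeated """
--     list_currency_sorted = sorted(list_currency)
--     string_list_currency = ''
--     previous_item = ''
--     for currency in list_currency_sorted:
--         if currency != previous_item:
--             string_list_currency += currency
--         previous_item = currency
--
--     return string_list_currency
-- ===== SOURCE B (Python) =====
-- def _get_currency_payment_list(list_currency):
--     """ It returns the elements of the
--         list that are not repeated """
--     return ''.join(sorted(set(list_currency)))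
-- ===== Notes on version B (the rewrite author's own statement) =====
-- stated objective: simpler
-- what changed: B deduplicates with a hash set first and then sorts and joins the distinct currencies, removing A's adjacent-duplicate loop with its previous_item accumulator and repeated string +=.
import Mathlib
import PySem

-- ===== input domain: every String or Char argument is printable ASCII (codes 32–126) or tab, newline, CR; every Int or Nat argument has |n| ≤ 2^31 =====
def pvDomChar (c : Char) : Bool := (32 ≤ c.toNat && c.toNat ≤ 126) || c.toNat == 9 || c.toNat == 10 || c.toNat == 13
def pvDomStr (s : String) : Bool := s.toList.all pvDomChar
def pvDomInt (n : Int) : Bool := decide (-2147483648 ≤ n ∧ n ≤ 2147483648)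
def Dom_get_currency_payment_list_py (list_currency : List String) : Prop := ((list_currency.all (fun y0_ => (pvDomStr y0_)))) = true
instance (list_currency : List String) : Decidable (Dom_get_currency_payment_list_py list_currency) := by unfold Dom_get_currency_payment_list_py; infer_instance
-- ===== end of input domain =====

-- B replaces A's sorted-adjacent-duplicate loop (previous_item accumulator + string +=) by
-- set-dedup first, then sort, then a single join; same return value, proved equal below.

-- ===== PORT A =====
def get_currency_payment_list_py (list_currency : List String) : String :=
  let list_currency_sorted := PySem.List.sorted list_currency (fun x => x) false
  (list_currency_sorted.foldl
    (fun (st : String × String) currency =>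
      (if currency ≠ st.2 then st.1 ++ currency else st.1, currency))
    ("", "")).1

-- ===== PORT B =====
def get_currency_payment_list_py_alt (list_currency : List String) : String :=
  PySem.Str.join "" (PySem.List.sorted (PySem.Set.ofList list_currency) (fun x => x) false)

-- ===== PRECONDITION & SPEC =====
def Spec_get_currency_payment_list_py (list_currency : List String) (out : String) : Prop := out = get_currency_payment_list_py_alt list_currency
instance (list_currency : List String) (out : String) : Decidable (Spec_get_currency_payment_list_py list_currency out) := by unfold Spec_get_currency_payment_list_py; infer_instance

-- ===== CLAIM (what is proved, stated in full; the proofs are below) =====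
def Claim_equal_get_currency_payment_list_py : Prop := ∀ (list_currency : List String), Dom_get_currency_payment_list_py list_currency → Spec_get_currency_payment_list_py list_currency (get_currency_payment_list_py list_currency)

-- ===== LEMMAS AND PROOFS =====

-- adjacent dedup with "previous item" p, as a list (the elements A's loop concatenates)
def pvDedup (p : String) : List String → List String
  | [] => []
  | x :: xs => if x = p then pvDedup p xs else x :: pvDedup x xs

-- List.intercalate with empty separator is flatten
theorem pvIntercalate_nil (xs : List (List Char)) : List.intercalate [] xs = xs.flatten := by
  induction xs with
  | nil => simp [List.intercalate]
  | cons a t ih => cases t <;> simp_all [List.intercalate]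

-- A's loop, from state (acc, p), appends exactly the elements of pvDedup p s
theorem pvFoldl_eq (s : List String) : ∀ (acc p : String),
    (s.foldl (fun (st : String × String) currency =>
      (if currency ≠ st.2 then st.1 ++ currency else st.1, currency)) (acc, p)).1
    = acc ++ PySem.Str.join "" (pvDedup p s) := by
  induction s with
  | nil => intro acc p; simp [pvDedup, PySem.Str.join, PySem.Chars.join, List.intercalate]
  | cons x xs ih =>
    intro acc p
    by_cases h : x = p
    · subst h
      rw [pvDedup, if_pos rfl, List.foldl_cons, if_neg (fun hc => hc rfl)]
      exact ih acc x
    · rw [pvDedup, if_neg h, List.foldl_cons, if_pos h]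
      rw [ih (acc ++ x) x]
      apply String.toList_inj.mp
      simp [PySem.Str.toList_join, PySem.Chars.join, pvIntercalate_nil, String.toList_append]

-- membership in pvDedup: the elements of s other than p (s sorted, p a lower bound)
theorem pvDedup_mem (s : List String) : ∀ (p : String),
    s.Pairwise (· ≤ ·) → (∀ y ∈ s, p ≤ y) →
    ∀ x, x ∈ pvDedup p s ↔ (x ∈ s ∧ x ≠ p) := by
  induction s with
  | nil => intro p _ _ x; simp [pvDedup]
  | cons a t ih =>
    intro p hs hp x
    rw [List.pairwise_cons] at hs
    by_cases h : a = p
    · subst h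
      rw [pvDedup, if_pos rfl, ih a hs.2 hs.1]
      constructor
      · rintro ⟨hm, hne⟩; exact ⟨List.mem_cons_of_mem _ hm, hne⟩
      · rintro ⟨hm, hne⟩
        rcases List.mem_cons.mp hm with h1 | h1
        · exact absurd h1 hne
        · exact ⟨h1, hne⟩
    · rw [pvDedup, if_neg h]
      rw [List.mem_cons]
      constructor
      · rintro (rfl | hm)
        · exact ⟨List.mem_cons_self, h⟩
        · rcases (ih a hs.2 hs.1 x).mp hm with ⟨hm1, _⟩
          refine ⟨List.mem_cons_of_mem _ hm1, ?_⟩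
          rintro rfl
          exact h (le_antisymm (hs.1 x hm1) (hp a List.mem_cons_self))
      · rintro ⟨hm, hne⟩
        rcases List.mem_cons.mp hm with h1 | h1
        · exact Or.inl h1
        · by_cases hax : x = a
          · exact Or.inl hax
          · exact Or.inr ((ih a hs.2 hs.1 x).mpr ⟨h1, hax⟩)

-- pvDedup of a sorted list is strictly increasing
theorem pvDedup_pairwise (s : List String) : ∀ (p : String),
    s.Pairwise (· ≤ ·) → (pvDedup p s).Pairwise (· < ·) := by
  induction s with
  | nil => intro p _; simp [pvDedup]
  | cons a t ih =>
    intro p hs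
    rw [List.pairwise_cons] at hs
    by_cases h : a = p
    · rw [pvDedup, if_pos h]; exact ih p hs.2
    · rw [pvDedup, if_neg h]
      refine List.pairwise_cons.mpr ⟨?_, ih a hs.2⟩
      intro z hz
      rcases (pvDedup_mem t a hs.2 hs.1 z).mp hz with ⟨hm, hne⟩
      exact lt_of_le_of_ne (hs.1 z hm) (Ne.symm hne)

theorem pvEmpty_lt (z : String) (h : z ≠ "") : "" < z := by
  rw [String.lt_iff_toList_lt]
  cases hz : z.toList with
  | nil => exact absurd (String.toList_inj.mp (by simp [hz])) h
  | cons c cs => exact List.nil_lt_cons c cs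


-- joining with "" ignores a leading empty string
theorem pvJoin_empty_cons (L : List String) :
    PySem.Str.join "" ("" :: L) = PySem.Str.join "" L := by
  apply String.toList_inj.mp
  simp [PySem.Str.toList_join, PySem.Chars.join, pvIntercalate_nil]

-- the sorted distinct elements are (optional leading "") plus pvDedup "" (sorted input)
theorem pvSortedSet_eq (l : List String) :
    PySem.List.sorted (PySem.Set.ofList l) (fun x => x) false
    = (if "" ∈ l then [""] else []) ++ pvDedup "" (PySem.List.sorted l (fun x => x) false) := by
  set s := PySem.List.sorted l (fun x => x) false with hs
  have hpw : s.Pairwise (· ≤ ·) := PySem.List.sorted_pairwise l (fun x => x)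
  have hlb : ∀ y ∈ s, ("" : String) ≤ y := by
    intro y _
    by_cases h : y = ""
    · simp [h]
    · exact le_of_lt (pvEmpty_lt y h)
  have hmem : ∀ x, x ∈ pvDedup "" s ↔ (x ∈ l ∧ x ≠ "") := by
    intro x
    rw [pvDedup_mem s "" hpw hlb x, hs, PySem.List.mem_sorted]
  have hpwd : (pvDedup "" s).Pairwise (· < ·) := pvDedup_pairwise s "" hpw
  apply PySem.List.sorted_eq_of_perm_of_pairwise_lt
  · -- permutation with Set.ofList l
    apply (List.perm_ext_iff_of_nodup ?_ (PySem.Set.nodup_ofList l)).mpr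
    · intro x
      rw [PySem.Set.mem_ofList, List.mem_append, hmem x]
      by_cases hx : x = ""
      · subst hx
        by_cases hl : ("" : String) ∈ l <;> simp [hl]
      · by_cases hl : ("" : String) ∈ l <;> simp [hl, hx]
    · -- the assembled list is Nodup
      by_cases hl : ("" : String) ∈ l
      · rw [if_pos hl]
        refine List.Nodup.cons ?_ hpwd.nodup
        intro hc
        exact ((hmem "").mp hc).2 rfl
      · rw [if_neg hl]; exact hpwd.nodup
  · -- strictly increasing
    by_cases hl : ("" : String) ∈ l
    · rw [if_pos hl]
      refine List.pairwise_cons.mpr ⟨?_, hpwd⟩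
      intro z hz
      exact pvEmpty_lt z ((hmem z).mp hz).2
    · rw [if_neg hl]; exact hpwd

-- ===== VERDICT (by name: the statement is the Claim_ definition above) =====
theorem get_currency_payment_list_py_spec : Claim_equal_get_currency_payment_list_py := by
  intro l _
  simp only [Spec_get_currency_payment_list_py, get_currency_payment_list_py,
    get_currency_payment_list_py_alt]
  rw [pvFoldl_eq, pvSortedSet_eq l]
  by_cases hl : ("" : String) ∈ l
  · rw [if_pos hl, List.singleton_append, pvJoin_empty_cons, String.empty_append]
  · rw [if_neg hl, List.nil_append, String.empty_append]
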